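-- pv_equiv track=rewrite | github.com/leolin49/ScheduleSimPy | Dataset/cluster-trace-gpu-v2023/csv/count_mem.py | count_memory_in_intervals
-- ===== SOURCE A (Python) =====
-- def count_memory_in_intervals(memory_capacities, intervals):
--     counts = {f"{intervals[i]+1}-{intervals[i+1]}": 0 for i in range(len(intervals)-1)}
--     for capacity in memory_capacities:
--         for i in range(len(intervals)-1):
--             if capacity >= intervals[i] and capacity < intervals[i+1]:
--                 counts[f"{intervals[i]+1}-{intervals[i+1]}"] += 1
--                 break
--     return counts
-- ===== SOURCE B (Python) =====
-- def _first_bin_label(value, bins):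
--     """Label of the first (label, lo, hi) bin with lo <= value < hi, or None."""
--     for label, lo, hi in bins:
--         if lo <= value < hi:
--             return label
--     return None
--
--
-- def count_memory_in_intervals(memory_capacities, intervals):
--     # Pair each boundary with its successor once, label each bin once.
--     bins = [(f"{lo + 1}-{hi}", lo, hi) for lo, hi in zip(intervals, intervals[1:])]
--     counts = {label: 0 for label, _, _ in bins}
--     # Tally duplicate capacities first, then locate each DISTINCT value once.
--     freq = {}
--     for capacity in memory_capacities:
--         freq[capacity] = freq.get(capacity, 0) + 1
--     for value, mult in freq.items():
--         label = _first_bin_label(value, bins)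
--         if label is not None:
--             counts[label] += mult
--     return counts
-- ===== Notes on version B (the rewrite author's own statement) =====
-- stated objective: alternative
-- what changed: B builds a frequency dict of the capacities once and locates the first matching interval bin only once per DISTINCT capacity (via a helper over precomputed (label, lo, hi) triples built by zipping the boundary list with its tail), instead of A's rescan of the interval boundaries for every single capacity with an inline break loop over indices.
import Mathlib
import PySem

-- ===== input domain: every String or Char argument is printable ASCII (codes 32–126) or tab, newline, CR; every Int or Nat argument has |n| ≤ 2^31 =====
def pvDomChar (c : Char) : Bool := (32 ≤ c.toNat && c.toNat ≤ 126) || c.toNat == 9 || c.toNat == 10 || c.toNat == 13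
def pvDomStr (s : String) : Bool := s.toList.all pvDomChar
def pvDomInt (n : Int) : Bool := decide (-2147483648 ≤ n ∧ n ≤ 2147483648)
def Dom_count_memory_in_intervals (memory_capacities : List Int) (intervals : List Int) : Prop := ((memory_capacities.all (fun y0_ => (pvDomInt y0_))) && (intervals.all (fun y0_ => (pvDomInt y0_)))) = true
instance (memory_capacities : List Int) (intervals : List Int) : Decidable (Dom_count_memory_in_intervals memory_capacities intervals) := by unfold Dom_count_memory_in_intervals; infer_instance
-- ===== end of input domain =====

-- B replaces A's per-capacity rescan of the boundaries by a frequency dict over the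
-- capacities plus one first-matching-bin lookup per DISTINCT capacity (objective:
-- alternative decomposition; it does the bin scan once per distinct value, not per element).


-- ===== PORT A =====
-- f"{lo+1}-{hi}"  (str(lo+1) + "-" + str(hi); built on the List Char side so the kernel reduces it)
def pvLabel (lo hi : Int) : String :=
  String.ofList (PySem.Int.toChars (lo + 1) ++ '-' :: PySem.Int.toChars hi)

-- the inner 'for i in range(len(intervals)-1): … break' of A; indices i, i+1 are always in range
def pvScanA (intervals : List Int) (capacity : Int) (counts : PySem.Dict String Int) :
    List Int → PySem.Dict String Int
  | [] => counts
  | i :: rest =>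
      let lo := PySem.List.pyGetD intervals i 0
      let hi := PySem.List.pyGetD intervals (i + 1) 0
      if capacity ≥ lo ∧ capacity < hi then
        counts.insert (pvLabel lo hi) (counts.getD (pvLabel lo hi) 0 + 1)  -- counts[key] += 1 (key always present)
      else
        pvScanA intervals capacity counts rest

def count_memory_in_intervals (memory_capacities : List Int) (intervals : List Int) :
    List (String × Int) :=
  let idxs := PySem.List.pyRange 0 (PySem.List.len intervals - 1) 1
  let counts0 : PySem.Dict String Int :=
    idxs.foldl (fun d i =>
      d.insert (pvLabel (PySem.List.pyGetD intervals i 0) (PySem.List.pyGetD intervals (i + 1) 0)) 0)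
      PySem.Dict.empty
  (memory_capacities.foldl (fun d capacity => pvScanA intervals capacity d idxs) counts0).items

-- ===== PORT B =====
-- bins = [(f"{lo+1}-{hi}", lo, hi) for lo, hi in zip(intervals, intervals[1:])]
def pvBins (intervals : List Int) : List (String × Int × Int) :=
  (intervals.zip (PySem.List.slice intervals (some 1) none)).map
    (fun p => (pvLabel p.1 p.2, p.1, p.2))

-- _first_bin_label(value, bins)
def pvFirstBinLabel (value : Int) : List (String × Int × Int) → Option String
  | [] => none
  | b :: rest => if b.2.1 ≤ value ∧ value < b.2.2 then some b.1 else pvFirstBinLabel value rest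

def count_memory_in_intervals_alt (memory_capacities : List Int) (intervals : List Int) :
    List (String × Int) :=
  let bins := pvBins intervals
  let counts0 : PySem.Dict String Int :=
    bins.foldl (fun d b => d.insert b.1 0) PySem.Dict.empty
  let freq : PySem.Dict Int Int :=
    memory_capacities.foldl (fun f c => f.insert c (f.getD c 0 + 1)) PySem.Dict.empty
  (freq.items.foldl (fun d p =>
      match pvFirstBinLabel p.1 bins with
      | some label => d.insert label (d.getD label 0 + p.2)  -- counts[label] += mult (key always present)
      | none => d) counts0).items

-- ===== PRECONDITION & SPEC =====
def Spec_count_memory_in_intervals (memory_capacities : List Int) (intervals : List Int) (out : List (String × Int)) : Prop := out = count_memory_in_intervals_alt memory_capacities intervals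
instance (memory_capacities : List Int) (intervals : List Int) (out : List (String × Int)) : Decidable (Spec_count_memory_in_intervals memory_capacities intervals out) := by unfold Spec_count_memory_in_intervals; infer_instance

-- ===== CLAIM (what is proved, stated in full; the proofs are below) =====
def Claim_equal_count_memory_in_intervals : Prop := ∀ (memory_capacities : List Int) (intervals : List Int), Dom_count_memory_in_intervals memory_capacities intervals → Spec_count_memory_in_intervals memory_capacities intervals (count_memory_in_intervals memory_capacities intervals)

-- ===== LEMMAS AND PROOFS =====

-- one generic step: locate the first matching bin, add m at its label (or do nothing)
def pvApply (bins : List (String × Int × Int)) (d : PySem.Dict String Int) (c m : Int) :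
    PySem.Dict String Int :=
  match pvFirstBinLabel c bins with
  | some k => d.insert k (d.getD k 0 + m)
  | none => d

theorem pvFirstBinLabel_mem {c : Int} {bins : List (String × Int × Int)} {k : String}
    (h : pvFirstBinLabel c bins = some k) : k ∈ bins.map (·.1) := by
  induction bins with
  | nil => simp [pvFirstBinLabel] at h
  | cons b rest ih =>
      by_cases hb : b.2.1 ≤ c ∧ c < b.2.2
      · rw [pvFirstBinLabel, if_pos hb] at h
        have hb1 : b.1 = k := Option.some.inj h
        simp [← hb1]
      · rw [pvFirstBinLabel, if_neg hb] at h
        exact List.mem_cons_of_mem _ (ih h)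

-- A's inner loop is exactly pvApply with weight 1 on the bins built from its index list
theorem pvScanA_eq_apply (intervals : List Int) (c : Int) (is : List Int)
    (d : PySem.Dict String Int) :
    pvScanA intervals c d is
      = pvApply (is.map (fun i =>
          (pvLabel (PySem.List.pyGetD intervals i 0) (PySem.List.pyGetD intervals (i + 1) 0),
           PySem.List.pyGetD intervals i 0, PySem.List.pyGetD intervals (i + 1) 0))) d c 1 := by
  induction is with
  | nil => simp [pvScanA, pvApply, pvFirstBinLabel]
  | cons i rest ih =>
      by_cases hb : PySem.List.pyGetD intervals i 0 ≤ c ∧ c < PySem.List.pyGetD intervals (i + 1) 0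
      · simp [pvScanA, pvApply, pvFirstBinLabel, hb, ge_iff_le]
      · simp only [pvScanA, List.map_cons]
        rw [if_neg (by exact fun h => hb ⟨h.1, h.2⟩), ih]
        simp [pvApply, pvFirstBinLabel, hb]

-- the bins of B are the (label, lo, hi) triples A reads through indices
theorem pvBins_eq (intervals : List Int) :
    (PySem.List.pyRange 0 (PySem.List.len intervals - 1) 1).map (fun i =>
        (pvLabel (PySem.List.pyGetD intervals i 0) (PySem.List.pyGetD intervals (i + 1) 0),
         PySem.List.pyGetD intervals i 0, PySem.List.pyGetD intervals (i + 1) 0))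
      = pvBins intervals := by
  rw [pvBins, PySem.List.slice_from_one]
  have hlen : (PySem.List.len intervals - 1 - 0).toNat = intervals.length - 1 := by
    rw [PySem.List.len_eq]; omega
  apply List.ext_getElem
  · simp only [List.length_map, PySem.List.length_pyRange_one, List.length_zip,
      List.length_tail, hlen]
    omega
  · intro k h1 h2
    have hk1 : k + 1 < intervals.length := by
      simp only [List.length_map, PySem.List.length_pyRange_one, hlen] at h1
      omega
    have hk' : k < intervals.length := by omega
    simp only [List.getElem_map, PySem.List.getElem_pyRange_one, List.getElem_zip,
      List.getElem_tail]
    have e1 : PySem.List.pyGetD intervals ((0 : Int) + (k : Int)) 0 = intervals[k] := by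
      rw [zero_add, PySem.List.pyGetD_natCast, List.getD_eq_getElem?_getD]
      simp [hk']
    have e2 : PySem.List.pyGetD intervals ((0 : Int) + (k : Int) + 1) 0 = intervals[k + 1] := by
      have hcast : (0 : Int) + (k : Int) + 1 = ((k + 1 : Nat) : Int) := by push_cast; omega
      rw [hcast, PySem.List.pyGetD_natCast, List.getD_eq_getElem?_getD]
      simp [hk1]
    rw [e1, e2]

-- 'counts[k] += m' at a present key rewrites every item pointwise
theorem pvBump_items (d : PySem.Dict String Int) (k : String) (m : Int)
    (hnd : d.keys.Nodup) (hk : d.contains k = true) :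
    (d.insert k (d.getD k 0 + m)).items
      = d.items.map (fun p => if p.1 = k then (p.1, p.2 + m) else p) := by
  rw [PySem.Dict.items_insert_of_contains d _ hk]
  apply List.map_congr_left
  intro p hp
  by_cases he : p.1 = k
  · rw [if_pos (by simp [he]), if_pos he]
    have hv : d.getD p.1 0 = p.2 :=
      PySem.Dict.getD_of_mem_items d (by simpa using hp) hnd 0
    rw [← he, hv]
  · rw [if_neg (by simp [he]), if_neg he]

theorem pvBump_keys (d : PySem.Dict String Int) (k : String) (v : Int)
    (hk : d.contains k = true) : (d.insert k v).keys = d.keys :=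
  PySem.Dict.keys_insert_of_contains d v hk

-- master loop lemma: a fold of weighted pvApply steps adds, at each existing item,
-- the total weight of the pairs whose value lands first at that item's key
theorem pvFoldApply (bins : List (String × Int × Int)) (ps : List (Int × Int)) :
    ∀ d : PySem.Dict String Int, d.keys.Nodup →
    (∀ k ∈ bins.map (·.1), d.contains k = true) →
    (ps.foldl (fun d p => pvApply bins d p.1 p.2) d).items
      = d.items.map (fun q => (q.1, q.2 +
          ((ps.filter (fun p => pvFirstBinLabel p.1 bins == some q.1)).map (·.2)).sum)) := by
  induction ps with
  | nil => intro d _ _; simp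
  | cons p ps ih =>
      intro d hnd hcov
      simp only [List.foldl_cons]
      cases hL : pvFirstBinLabel p.1 bins with
      | none =>
          rw [show pvApply bins d p.1 p.2 = d by simp [pvApply, hL], ih d hnd hcov]
          simp [hL]
      | some k =>
          have hk : d.contains k = true := hcov k (pvFirstBinLabel_mem hL)
          have hstep : pvApply bins d p.1 p.2 = d.insert k (d.getD k 0 + p.2) := by
            simp [pvApply, hL]
          rw [hstep, ih _ (by rw [pvBump_keys d k _ hk]; exact hnd)
            (fun k' hk' => by
              rw [PySem.Dict.contains_insert]
              cases h : (k' == k) with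
              | true => simp
              | false => simp [hcov k' hk'])]
          rw [pvBump_items d k p.2 hnd hk, List.map_map]
          apply List.map_congr_left
          rintro ⟨q1, q2⟩ _
          by_cases he : q1 = k
          · subst he
            have hfil : (p :: ps).filter (fun r => pvFirstBinLabel r.1 bins == some q1)
                = p :: ps.filter (fun r => pvFirstBinLabel r.1 bins == some q1) := by
              rw [List.filter_cons, if_pos (by simp [hL])]
            simp only [Function.comp_apply, hfil, List.map_cons, List.sum_cons]
            simp only [if_true]
            exact Prod.ext rfl (add_assoc _ _ _)
          · have hfil : (p :: ps).filter (fun r => pvFirstBinLabel r.1 bins == some q1)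
                = ps.filter (fun r => pvFirstBinLabel r.1 bins == some q1) := by
              rw [List.filter_cons, if_neg (by simp [hL]; exact fun hx => he hx.symm)]
            simp only [Function.comp_apply, hfil, if_neg he]

-- weight-1 pairs: the filtered weight sum is a countP
theorem pvSumA (caps : List Int) (p : Int → Bool) :
    (((caps.map (fun c => (c, (1 : Int)))).filter (fun q => p q.1)).map (·.2)).sum
      = (caps.countP p : Int) := by
  induction caps with
  | nil => simp
  | cons c caps ih =>
      by_cases hc : p c
      · simp [hc, ih]; omega
      · simp [hc, ih]

-- multiplicity pairs over the distinct values: the filtered weight sum is the same countP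
theorem pvSumB (caps : List Int) (p : Int → Bool) :
    ((((PySem.Set.ofList caps).map (fun v => (v, (caps.count v : Int)))).filter
        (fun q => p q.1)).map (·.2)).sum
      = (caps.countP p : Int) := by
  have hperm : (PySem.Set.ofList caps).Perm caps.dedup := by
    rw [List.perm_ext_iff_of_nodup (PySem.Set.nodup_ofList caps) caps.nodup_dedup]
    intro a; simp [PySem.Set.mem_ofList, List.mem_dedup]
  have h1 : ((((PySem.Set.ofList caps).map (fun v => (v, (caps.count v : Int)))).filter
        (fun q => p q.1)).map (·.2)).sum
      = (((caps.dedup.map (fun v => (v, (caps.count v : Int)))).filter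
        (fun q => p q.1)).map (·.2)).sum :=
    List.Perm.sum_eq (List.Perm.map _ (List.Perm.filter _ (List.Perm.map _ hperm)))
  rw [h1]
  have h2 : ((caps.dedup.map (fun v => (v, (caps.count v : Int)))).filter (fun q => p q.1))
      = (caps.dedup.filter p).map (fun v => (v, (caps.count v : Int))) := by
    rw [List.filter_map]; rfl
  rw [h2, List.map_map]
  have h3 : ((·.2) ∘ fun v => (v, (caps.count v : Int))) = fun v => ((caps.count v : Int)) := rfl
  have h4 : (caps.dedup.filter p).map (fun v => ((caps.count v : Int)))
      = ((caps.dedup.filter p).map (fun v => caps.count v)).map Nat.cast := by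
    rw [List.map_map]; rfl
  rw [h3, h4, ← Nat.cast_list_sum, List.sum_map_count_dedup_filter_eq_countP]

-- ===== VERDICT (by name: the statement is the Claim_ definition above) =====
theorem count_memory_in_intervals_spec : Claim_equal_count_memory_in_intervals := by
  unfold Claim_equal_count_memory_in_intervals
  intro caps intervals _
  unfold Spec_count_memory_in_intervals
  simp only [count_memory_in_intervals, count_memory_in_intervals_alt]
  set f := fun i =>
    (pvLabel (PySem.List.pyGetD intervals i 0) (PySem.List.pyGetD intervals (i + 1) 0),
     PySem.List.pyGetD intervals i 0, PySem.List.pyGetD intervals (i + 1) 0) with hf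
  set idxs := PySem.List.pyRange 0 (PySem.List.len intervals - 1) 1 with hidxs
  have hbins : idxs.map f = pvBins intervals := pvBins_eq intervals
  -- A's initial dict is B's initial dict
  have hc0 : idxs.foldl (fun (d : PySem.Dict String Int) i =>
        d.insert (pvLabel (PySem.List.pyGetD intervals i 0)
          (PySem.List.pyGetD intervals (i + 1) 0)) 0) PySem.Dict.empty
      = (pvBins intervals).foldl (fun (d : PySem.Dict String Int) b => d.insert b.1 0)
          PySem.Dict.empty := by
    rw [← hbins, List.foldl_map]
  rw [hc0]
  set counts0 : PySem.Dict String Int :=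
    (pvBins intervals).foldl (fun d b => d.insert b.1 0) PySem.Dict.empty with hcounts0
  have hkeys : counts0.keys = PySem.Set.ofList ((pvBins intervals).map (·.1)) := by
    have h := PySem.Dict.keys_foldl_insert_key (ν := Int) (pvBins intervals)
      (fun b => b.1) (fun _ _ => 0) PySem.Dict.empty
    rw [hcounts0]
    simpa [PySem.Dict.keys_empty, PySem.Set.update_nil_left] using h
  have hnd : counts0.keys.Nodup := by rw [hkeys]; exact PySem.Set.nodup_ofList _
  have hcov : ∀ k ∈ (pvBins intervals).map (·.1), counts0.contains k = true := by
    intro k hk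
    rw [PySem.Dict.contains_iff_mem_keys, hkeys]
    exact (PySem.Set.mem_ofList _ _).mpr hk
  -- A's capacity loop is a weight-1 pvApply fold
  have hA : caps.foldl (fun d capacity => pvScanA intervals capacity d idxs) counts0
      = (caps.map (fun c => (c, (1 : Int)))).foldl
          (fun d p => pvApply (pvBins intervals) d p.1 p.2) counts0 := by
    rw [List.foldl_map]
    apply PySem.List.foldl_congr_mem
    intro d c _
    rw [pvScanA_eq_apply, hbins]
  -- B's frequency dict is the counter
  have hfreq : caps.foldl (fun f c => f.insert c (f.getD c 0 + 1))
        (PySem.Dict.empty : PySem.Dict Int Int) = PySem.Dict.counter caps :=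
    PySem.Dict.foldl_insert_getD_add_one_eq_counter caps
  rw [hA, hfreq, PySem.Dict.items_counter]
  have hBfun : (fun (d : PySem.Dict String Int) (p : Int × Int) =>
      match pvFirstBinLabel p.1 (pvBins intervals) with
      | some label => d.insert label (d.getD label 0 + p.2)
      | none => d) = fun d p => pvApply (pvBins intervals) d p.1 p.2 := rfl
  rw [hBfun,
    pvFoldApply (pvBins intervals) (caps.map (fun c => (c, (1 : Int)))) counts0 hnd hcov,
    pvFoldApply (pvBins intervals)
      ((PySem.Set.ofList caps).map (fun k => (k, (List.count k caps : Int)))) counts0 hnd hcov]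
  apply List.map_congr_left
  intro q _
  rw [pvSumA caps (fun c => pvFirstBinLabel c (pvBins intervals) == some q.1),
    pvSumB caps (fun c => pvFirstBinLabel c (pvBins intervals) == some q.1)]
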